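-- pv_equiv track=rewrite | github.com/necrop/pylib3.2 | lex/oed/quotation/keywordfinder.py | _secondary_lemma_match
-- ===== SOURCE A (Python) =====
-- def _secondary_lemma_match(secondary_lemmas, tokens, bigrams):
--     match = None
--     for lemma_full, lemma_flat in secondary_lemmas:
--         for token_full, token_flat in tokens + bigrams:
--             if (lemma_flat == token_flat or
--                     lemma_flat + 's' == token_flat or
--                     lemma_flat + 'es' == token_flat):
--                 match = token_full
--                 break
--     return match
-- ===== SOURCE B (Python) =====
-- def _secondary_lemma_match(secondary_lemmas, tokens, bigrams):
--     # Index each token_flat once by its first position; then probe three keys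
--     # per lemma, scanning the lemmas from the end (last matching lemma wins).
--     first = {}
--     for i, (full, flat) in enumerate(tokens + bigrams):
--         if flat not in first:
--             first[flat] = (i, full)
--     for _, flat in reversed(secondary_lemmas):
--         best = None
--         for key in (flat, flat + 's', flat + 'es'):
--             entry = first.get(key)
--             if entry is not None and (best is None or entry[0] < best[0]):
--                 best = entry
--         if best is not None:
--             return best[1]
--     return None
-- ===== Notes on version B (the rewrite author's own statement) =====
-- stated objective: faster
-- what changed: Replaces the per-lemma linear scan over tokens+bigrams by a dict from token_flat to (first index, token_full) built once, probing three keys per lemma and scanning lemmas from the end with early return.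
import Mathlib
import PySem

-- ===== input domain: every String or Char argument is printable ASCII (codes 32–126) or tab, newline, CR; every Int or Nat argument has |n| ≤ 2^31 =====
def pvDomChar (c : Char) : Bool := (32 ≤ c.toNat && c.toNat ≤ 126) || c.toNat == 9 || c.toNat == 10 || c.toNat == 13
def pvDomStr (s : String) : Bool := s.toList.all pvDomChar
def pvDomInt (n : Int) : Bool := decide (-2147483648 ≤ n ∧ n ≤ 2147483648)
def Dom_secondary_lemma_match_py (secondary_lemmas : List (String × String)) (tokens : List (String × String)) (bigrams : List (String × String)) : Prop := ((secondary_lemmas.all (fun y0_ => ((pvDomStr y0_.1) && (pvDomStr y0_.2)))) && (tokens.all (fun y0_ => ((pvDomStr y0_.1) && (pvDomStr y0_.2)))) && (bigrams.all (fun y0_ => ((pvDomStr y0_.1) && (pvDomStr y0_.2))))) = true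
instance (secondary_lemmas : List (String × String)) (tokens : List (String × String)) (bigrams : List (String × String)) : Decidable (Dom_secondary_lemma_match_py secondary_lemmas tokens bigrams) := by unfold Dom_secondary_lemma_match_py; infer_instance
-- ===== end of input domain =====

-- B replaces A's per-lemma rescan of tokens+bigrams by a first-occurrence index
-- (dict token_flat → (first position, token_full)) built once, probing three keys
-- per lemma and scanning the lemmas from the end with early return (objective: faster).

-- ===== PORT A =====
-- inner `for token_full, token_flat in tokens + bigrams: if …: match = token_full; break`
def pvInnerA (flat : String) : List (String × String) → Option String → Option String
  | [], m => m
  | t :: rest, m =>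
    if flat == t.2 || flat ++ "s" == t.2 || flat ++ "es" == t.2 then some t.1
    else pvInnerA flat rest m

def secondary_lemma_match_py (secondary_lemmas : List (String × String)) (tokens : List (String × String)) (bigrams : List (String × String)) : Option String :=
  secondary_lemmas.foldl (fun m lp => pvInnerA lp.2 (tokens ++ bigrams) m) none

-- ===== PORT B =====
-- `first = {}; for i, (full, flat) in enumerate(tokens + bigrams): if flat not in first: first[flat] = (i, full)`
def pvBuildFirst (xs : List (String × String)) : PySem.Dict String (Int × String) :=
  (PySem.List.enumerate xs 0).foldl
    (fun d p => if d.contains p.2.2 then d else d.insert p.2.2 (p.1, p.2.1))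
    PySem.Dict.empty

-- `best = None; for key in (flat, flat+'s', flat+'es'): entry = first.get(key); if entry is not None and (best is None or entry[0] < best[0]): best = entry`
def pvProbe (first : PySem.Dict String (Int × String)) (flat : String) : Option (Int × String) :=
  [flat, flat ++ "s", flat ++ "es"].foldl
    (fun best k =>
      match first.get? k with
      | none => best
      | some e =>
        match best with
        | none => some e
        | some b => if e.1 < b.1 then some e else best)
    none

-- `for _, flat in reversed(secondary_lemmas): … if best is not None: return best[1]`
def pvScanB (first : PySem.Dict String (Int × String)) : List (String × String) → Option String
  | [] => none
  | lp :: rest =>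
    match pvProbe first lp.2 with
    | some b => some b.2
    | none => pvScanB first rest

def secondary_lemma_match_py_alt (secondary_lemmas : List (String × String)) (tokens : List (String × String)) (bigrams : List (String × String)) : Option String :=
  pvScanB (pvBuildFirst (tokens ++ bigrams)) secondary_lemmas.reverse

-- ===== PRECONDITION & SPEC =====
def Spec_secondary_lemma_match_py (secondary_lemmas : List (String × String)) (tokens : List (String × String)) (bigrams : List (String × String)) (out : Option String) : Prop := out = secondary_lemma_match_py_alt secondary_lemmas tokens bigrams
instance (secondary_lemmas : List (String × String)) (tokens : List (String × String)) (bigrams : List (String × String)) (out : Option String) : Decidable (Spec_secondary_lemma_match_py secondary_lemmas tokens bigrams out) := by unfold Spec_secondary_lemma_match_py; infer_instance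

-- ===== CLAIM (what is proved, stated in full; the proofs are below) =====
def Claim_equal_secondary_lemma_match_py : Prop := ∀ (secondary_lemmas : List (String × String)) (tokens : List (String × String)) (bigrams : List (String × String)), Dom_secondary_lemma_match_py secondary_lemmas tokens bigrams → Spec_secondary_lemma_match_py secondary_lemmas tokens bigrams (secondary_lemma_match_py secondary_lemmas tokens bigrams)

-- ===== LEMMAS AND PROOFS =====

-- A's match predicate on a (token_full, token_flat) pair
def pvP (flat : String) (t : String × String) : Bool :=
  flat == t.2 || flat ++ "s" == t.2 || flat ++ "es" == t.2

-- first element satisfying p, paired with its position counted from n, keeping token_full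
def pvFindFrom (p : String × String → Bool) (n : Int) : List (String × String) → Option (Int × String)
  | [] => none
  | x :: xs => if p x then some (n, x.1) else pvFindFrom p (n + 1) xs

-- one step of pvProbe's fold, with the lookup result already taken
def pvComb (best o : Option (Int × String)) : Option (Int × String) :=
  match o with
  | none => best
  | some e =>
    match best with
    | none => some e
    | some b => if e.1 < b.1 then some e else best

lemma pvProbe_eq (first : PySem.Dict String (Int × String)) (flat : String) :
    pvProbe first flat =
      pvComb (pvComb (pvComb none (first.get? flat)) (first.get? (flat ++ "s")))
        (first.get? (flat ++ "es")) := rfl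

lemma pvBuildFirst_get?_aux (k : String) (xs : List (String × String)) :
    ∀ (n : Int) (d : PySem.Dict String (Int × String)),
      (((PySem.List.enumerate xs n).foldl
          (fun d p => if d.contains p.2.2 then d else d.insert p.2.2 (p.1, p.2.1)) d).get? k)
        = match d.get? k with
          | some v => some v
          | none => pvFindFrom (fun t => t.2 == k) n xs := by
  induction xs with
  | nil =>
    intro n d
    simp only [PySem.List.enumerate_nil, List.foldl_nil, pvFindFrom]
    cases d.get? k <;> simp
  | cons x xs ih =>
    intro n d
    rw [PySem.List.enumerate_cons]
    simp only [List.foldl_cons]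
    by_cases hc : d.contains x.2 = true
    · rw [if_pos hc, ih]
      by_cases hk : x.2 = k
      · subst hk
        have hs : (d.get? x.2).isSome := by
          rw [← PySem.Dict.contains_eq_isSome_get?]; exact hc
        cases h : d.get? x.2 with
        | none => rw [h] at hs; simp at hs
        | some v => simp [pvFindFrom]
      · simp only [pvFindFrom]
        rw [if_neg (by simpa using hk)]
    · rw [if_neg hc, ih]
      by_cases hk : x.2 = k
      · subst hk
        have hd : d.get? x.2 = none := by
          rw [PySem.Dict.get?_eq_none_iff_contains]; simpa using hc
        rw [PySem.Dict.get?_insert_self, hd]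
        simp [pvFindFrom]
      · have hne : k ≠ x.2 := fun h => hk h.symm
        rw [PySem.Dict.get?_insert_of_ne _ _ hne]
        simp only [pvFindFrom]
        rw [if_neg (by simpa using hk)]

lemma pvBuildFirst_get? (xs : List (String × String)) (k : String) :
    (pvBuildFirst xs).get? k = pvFindFrom (fun t => t.2 == k) 0 xs := by
  unfold pvBuildFirst
  rw [pvBuildFirst_get?_aux]
  simp [PySem.Dict.get?_empty]

lemma pvFindFrom_bound (p : String × String → Bool) :
    ∀ (xs : List (String × String)) (n : Int) (e : Int × String),
      pvFindFrom p n xs = some e → n ≤ e.1 := by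
  intro xs
  induction xs with
  | nil => intro n e h; simp [pvFindFrom] at h
  | cons x xs ih =>
    intro n e h
    simp only [pvFindFrom] at h
    split_ifs at h with hx
    · cases h; simp
    · have := ih (n + 1) e h; omega

lemma pv_ne_s (f : String) : f ≠ f ++ "s" := by
  intro h
  have h2 := congrArg String.length h
  rw [String.length_append] at h2
  have hs : ("s" : String).length = 1 := rfl
  omega

lemma pv_ne_es (f : String) : f ≠ f ++ "es" := by
  intro h
  have h2 := congrArg String.length h
  rw [String.length_append] at h2
  have hs : ("es" : String).length = 2 := rfl
  omega

lemma pvComb_none (o : Option (Int × String)) : pvComb none o = o := by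
  cases o <;> rfl

lemma pvComb_keep (e : Int × String) (o : Option (Int × String))
    (h : ∀ b, o = some b → e.1 < b.1) : pvComb (some e) o = some e := by
  cases o with
  | none => rfl
  | some b =>
    have := h b rfl
    simp only [pvComb]
    rw [if_neg (by omega)]

lemma pvComb_take (o : Option (Int × String)) (e : Int × String)
    (h : ∀ b, o = some b → e.1 < b.1) : pvComb o (some e) = some e := by
  cases o with
  | none => rfl
  | some b =>
    have := h b rfl
    simp only [pvComb]
    rw [if_pos this]

lemma pvComb_bound {A B : Option (Int × String)} {n : Int}
    (hA : ∀ b, A = some b → n < b.1) (hB : ∀ b, B = some b → n < b.1) :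
    ∀ b, pvComb A B = some b → n < b.1 := by
  intro b h
  cases B with
  | none => exact hA b h
  | some e =>
    cases A with
    | none => simp only [pvComb] at h; cases h; exact hB b rfl
    | some a =>
      simp only [pvComb] at h
      split_ifs at h <;> cases h
      · exact hB b rfl
      · exact hA b rfl

lemma pvTailBound (p : String × String → Bool) (xs : List (String × String)) (n : Int) :
    ∀ b, pvFindFrom p (n + 1) xs = some b → n < b.1 := by
  intro b h
  have := pvFindFrom_bound p xs (n + 1) b h
  omega

lemma pvFind3 (flat : String) :
    ∀ (xs : List (String × String)) (n : Int),
      pvComb (pvComb (pvComb none (pvFindFrom (fun t => t.2 == flat) n xs))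
          (pvFindFrom (fun t => t.2 == flat ++ "s") n xs))
        (pvFindFrom (fun t => t.2 == flat ++ "es") n xs)
        = pvFindFrom (pvP flat) n xs := by
  intro xs
  induction xs with
  | nil => intro n; simp [pvFindFrom, pvComb]
  | cons x xs ih =>
    intro n
    simp only [pvFindFrom, pvP]
    by_cases h1 : x.2 = flat
    · have c1 : (x.2 == flat) = true := by simp [h1]
      have c2 : ¬ ((x.2 == flat ++ "s") = true) := by
        simp [h1]; exact pv_ne_s flat
      have c3 : ¬ ((x.2 == flat ++ "es") = true) := by
        simp [h1]; exact pv_ne_es flat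
      have hp : (flat == x.2 || flat ++ "s" == x.2 || flat ++ "es" == x.2) = true := by
        simp [h1]
      rw [if_pos c1, if_neg c2, if_neg c3, if_pos hp]
      rw [pvComb_none, pvComb_keep _ _ (pvTailBound _ xs n),
        pvComb_keep _ _ (pvTailBound _ xs n)]
    · by_cases h2 : x.2 = flat ++ "s"
      · have c1 : ¬ ((x.2 == flat) = true) := by simp [h2]
        have c2 : (x.2 == flat ++ "s") = true := by rw [h2]; exact beq_self_eq_true _
        have c3 : ¬ ((x.2 == flat ++ "es") = true) := by simp [h2]
        have hp : (flat == x.2 || flat ++ "s" == x.2 || flat ++ "es" == x.2) = true := by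
          simp [h2]
        rw [if_neg c1, if_pos c2, if_neg c3, if_pos hp]
        rw [pvComb_none, pvComb_take _ _ (pvTailBound _ xs n),
          pvComb_keep _ _ (pvTailBound _ xs n)]
      · by_cases h3 : x.2 = flat ++ "es"
        · have c1 : ¬ ((x.2 == flat) = true) := by simp [h3]
          have c2 : ¬ ((x.2 == flat ++ "s") = true) := by simp [h3]
          have c3 : (x.2 == flat ++ "es") = true := by rw [h3]; exact beq_self_eq_true _
          have hp : (flat == x.2 || flat ++ "s" == x.2 || flat ++ "es" == x.2) = true := by
            simp [h3]
          rw [if_neg c1, if_neg c2, if_pos c3, if_pos hp]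
          rw [pvComb_none]
          exact pvComb_take _ _
            (pvComb_bound (pvTailBound _ xs n) (pvTailBound _ xs n))
        · have c1 : ¬ ((x.2 == flat) = true) := by simp; exact h1
          have c2 : ¬ ((x.2 == flat ++ "s") = true) := by simp; exact h2
          have c3 : ¬ ((x.2 == flat ++ "es") = true) := by simp; exact h3
          have hp : ¬ ((flat == x.2 || flat ++ "s" == x.2 || flat ++ "es" == x.2) = true) := by
            intro hcontra
            simp only [Bool.or_eq_true, beq_iff_eq] at hcontra
            exact hcontra.elim
              (fun h' => h'.elim (fun h => h1 h.symm) (fun h => h2 h.symm))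
              (fun h => h3 h.symm)
          rw [if_neg c1, if_neg c2, if_neg c3, if_neg hp]
          exact ih (n + 1)

lemma pvProbe_char (xs : List (String × String)) (flat : String) :
    pvProbe (pvBuildFirst xs) flat = pvFindFrom (pvP flat) 0 xs := by
  rw [pvProbe_eq, pvBuildFirst_get?, pvBuildFirst_get?, pvBuildFirst_get?]
  exact pvFind3 flat xs 0

lemma pvInnerA_char (flat : String) :
    ∀ (xs : List (String × String)) (n : Int) (m : Option String),
      pvInnerA flat xs m
        = match pvFindFrom (pvP flat) n xs with
          | some e => some e.2
          | none => m := by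
  intro xs
  induction xs with
  | nil => intro n m; simp [pvInnerA, pvFindFrom]
  | cons x xs ih =>
    intro n m
    simp only [pvInnerA, pvFindFrom, pvP]
    split_ifs with h
    · rfl
    · exact ih (n + 1) m

lemma pvScanB_append (first : PySem.Dict String (Int × String)) (l1 l2 : List (String × String)) :
    pvScanB first (l1 ++ l2)
      = match pvScanB first l1 with
        | some v => some v
        | none => pvScanB first l2 := by
  induction l1 with
  | nil => simp [pvScanB]
  | cons lp l1 ih =>
    simp only [List.cons_append, pvScanB, ih]
    cases pvProbe first lp.2 <;> rfl

lemma pvMainScan (xs : List (String × String)) :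
    ∀ (sl : List (String × String)) (m : Option String),
      sl.foldl (fun m lp => pvInnerA lp.2 xs m) m
        = match pvScanB (pvBuildFirst xs) sl.reverse with
          | some v => some v
          | none => m := by
  intro sl
  induction sl with
  | nil => intro m; simp [pvScanB]
  | cons lp sl ih =>
    intro m
    simp only [List.foldl_cons, List.reverse_cons]
    rw [ih, pvScanB_append]
    cases hrev : pvScanB (pvBuildFirst xs) sl.reverse with
    | some v => rfl
    | none =>
      simp only []
      rw [pvInnerA_char lp.2 xs 0 m]
      simp only [pvScanB, pvProbe_char]
      cases pvFindFrom (pvP lp.2) 0 xs <;> rfl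

-- ===== VERDICT (by name: the statement is the Claim_ definition above) =====
theorem secondary_lemma_match_py_spec : Claim_equal_secondary_lemma_match_py := by
  intro sl tokens bigrams _
  unfold Spec_secondary_lemma_match_py secondary_lemma_match_py secondary_lemma_match_py_alt
  rw [pvMainScan (tokens ++ bigrams) sl none]
  cases pvScanB (pvBuildFirst (tokens ++ bigrams)) sl.reverse <;> rfl
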